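-- pv_equiv track=rewrite | github.com/WenxinAZhao/VoG | VoG/utils.py | has_cross_depth_entity_overlap
-- ===== SOURCE A (Python) =====
-- def has_cross_depth_entity_overlap(reasoning_chains):
--     for path_group in reasoning_chains:
--         # Use list of sets to collect entities at each depth
--         depth_entity_sets = []
--         for path in path_group:
--             depth_entities = set()
--             for triplet in path:
--                 head, _, tail = triplet
--                 depth_entities.add(head)
--                 depth_entities.add(tail)
--             depth_entity_sets.append(depth_entities)
--
--         # Compare all depth combinations
--         for i in range(len(depth_entity_sets)):
--             for j in range(i + 1, len(depth_entity_sets)):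
--                 if depth_entity_sets[i].intersection(depth_entity_sets[j]):
--                     return True  # Overlapping entity detected
--     return False
-- ===== SOURCE B (Python) =====
-- def has_cross_depth_entity_overlap(reasoning_chains):
--     for path_group in reasoning_chains:
--         first_path = {}
--         for idx, path in enumerate(path_group):
--             for head, _, tail in path:
--                 for entity in (head, tail):
--                     seen = first_path.get(entity)
--                     if seen is None:
--                         first_path[entity] = idx
--                     elif seen != idx:
--                         return True
--     return False
-- ===== Notes on version B (the rewrite author's own statement) =====
-- stated objective: alternative
-- what changed: Replaces the per-group list of entity sets plus all-pairs intersection test with a single pass per group that records each entity's first path index in a dict and flags an entity recurring under a different index.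
import Mathlib
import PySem

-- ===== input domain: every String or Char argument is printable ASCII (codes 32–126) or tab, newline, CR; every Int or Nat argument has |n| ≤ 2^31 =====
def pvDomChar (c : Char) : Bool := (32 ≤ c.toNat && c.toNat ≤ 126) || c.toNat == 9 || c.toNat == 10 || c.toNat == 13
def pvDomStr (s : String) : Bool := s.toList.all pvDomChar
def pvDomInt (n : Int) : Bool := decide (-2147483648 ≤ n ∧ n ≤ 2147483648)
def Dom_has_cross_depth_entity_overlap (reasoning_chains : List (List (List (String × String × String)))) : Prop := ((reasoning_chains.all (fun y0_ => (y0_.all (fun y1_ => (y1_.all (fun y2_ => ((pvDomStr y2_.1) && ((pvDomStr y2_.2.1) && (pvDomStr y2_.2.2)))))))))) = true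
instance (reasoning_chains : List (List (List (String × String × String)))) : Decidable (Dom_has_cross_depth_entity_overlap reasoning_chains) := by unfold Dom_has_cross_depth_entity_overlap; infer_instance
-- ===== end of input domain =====

-- B replaces A's per-group all-pairs set-intersection test by a single pass per group
-- with a dict entity → first path index (objective: alternative single-pass algorithm).

-- ===== PORT A =====
-- the set of entities of one path (head and tail of each triplet added in order, as in A)
def pvEnts (path : List (String × String × String)) : PySem.Set String :=
  path.foldl (fun s t => PySem.Set.add (PySem.Set.add s t.1) t.2.2) PySem.Set.empty

-- A's triangular double loop 'for i …: for j in range(i+1, …): if sets[i].intersection(sets[j]): return True'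
def pvPairs : List (PySem.Set String) → Bool
  | [] => false
  | s :: rest => rest.any (fun t => !(PySem.Set.inter s t).isEmpty) || pvPairs rest

def has_cross_depth_entity_overlap (reasoning_chains : List (List (List (String × String × String)))) : Bool :=
  reasoning_chains.any (fun path_group => pvPairs (path_group.map pvEnts))

-- ===== PORT B =====
-- one entity: look it up; absent → record current path index; present under another index → conflict
def pvStep (d : PySem.Dict String Int) (idx : Int) (e : String) : PySem.Dict String Int × Bool :=
  match d.get? e with
  | none => (d.insert e idx, false)
  | some p => (d, p != idx)

-- the two entities of each triplet of one path, with early exit on conflict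
def pvScanPath (d : PySem.Dict String Int) (idx : Int) :
    List (String × String × String) → PySem.Dict String Int × Bool
  | [] => (d, false)
  | t :: rest =>
    let r1 := pvStep d idx t.1
    if r1.2 then (r1.1, true) else
    let r2 := pvStep r1.1 idx t.2.2
    if r2.2 then (r2.1, true) else pvScanPath r2.1 idx rest

-- 'for idx, path in enumerate(path_group)'
def pvScanGroup (d : PySem.Dict String Int) (idx : Int) :
    List (List (String × String × String)) → Bool
  | [] => false
  | p :: rest =>
    let r := pvScanPath d idx p
    if r.2 then true else pvScanGroup r.1 (idx + 1) rest

def has_cross_depth_entity_overlap_alt (reasoning_chains : List (List (List (String × String × String)))) : Bool :=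
  reasoning_chains.any (fun path_group => pvScanGroup PySem.Dict.empty 0 path_group)

-- ===== PRECONDITION & SPEC =====
def Spec_has_cross_depth_entity_overlap (reasoning_chains : List (List (List (String × String × String)))) (out : Bool) : Prop := out = has_cross_depth_entity_overlap_alt reasoning_chains
instance (reasoning_chains : List (List (List (String × String × String)))) (out : Bool) : Decidable (Spec_has_cross_depth_entity_overlap reasoning_chains out) := by unfold Spec_has_cross_depth_entity_overlap; infer_instance

-- ===== CLAIM (what is proved, stated in full; the proofs are below) =====
def Claim_equal_has_cross_depth_entity_overlap : Prop := ∀ (reasoning_chains : List (List (List (String × String × String)))), Dom_has_cross_depth_entity_overlap reasoning_chains → Spec_has_cross_depth_entity_overlap reasoning_chains (has_cross_depth_entity_overlap reasoning_chains)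

-- ===== LEMMAS AND PROOFS =====

-- flat list of the entities of a path, in traversal order
def pvEntsL (path : List (String × String × String)) : List String :=
  path.flatMap (fun t => [t.1, t.2.2])

-- B's scan rewritten ov the flat entity list, one entity at a time
def pvScanEnts (d : PySem.Dict String Int) (idx : Int) :
    List String → PySem.Dict String Int × Bool
  | [] => (d, false)
  | e :: es =>
    let r := pvStep d idx e
    if r.2 then (r.1, true) else pvScanEnts r.1 idx es

-- the common overlap property: some entity shared between a path and a later path of the group
def pvGP : List (List (String × String × String)) → Prop
  | [] => False
  | p :: rest => (∃ e ∈ pvEntsL p, ∃ q ∈ rest, e ∈ pvEntsL q) ∨ pvGP rest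

theorem pv_mem_ents_aux (path : List (String × String × String)) (e : String) :
    ∀ s : PySem.Set String,
    e ∈ path.foldl (fun s t => PySem.Set.add (PySem.Set.add s t.1) t.2.2) s ↔
      e ∈ s ∨ e ∈ pvEntsL path := by
  induction path with
  | nil => simp [pvEntsL]
  | cons t rest ih =>
    intro s
    simp [List.foldl_cons, ih, PySem.Set.mem_add, pvEntsL, or_assoc]

theorem pv_mem_ents (path : List (String × String × String)) (e : String) :
    e ∈ pvEnts path ↔ e ∈ pvEntsL path := by
  simp [pvEnts, pv_mem_ents_aux, PySem.Set.empty]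

theorem pv_scanPath_eq (idx : Int) (path : List (String × String × String)) :
    ∀ d, pvScanPath d idx path = pvScanEnts d idx (pvEntsL path) := by
  induction path with
  | nil => intro d; rfl
  | cons t rest ih =>
    intro d
    simp only [pvScanPath, pvEntsL, List.flatMap_cons, List.cons_append, List.nil_append,
      pvScanEnts]
    by_cases h1 : (pvStep d idx t.1).2
    · simp [h1]
    · simp only [h1, Bool.false_eq_true, if_false]
      by_cases h2 : (pvStep (pvStep d idx t.1).1 idx t.2.2).2
      · simp [h2]
      · simp [h2, ih, pvEntsL]

-- the scan over a flat entity list: it reports true iff some entity is already recorded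
-- under a different index, and if it reports false the dict gained exactly the new entities
theorem pv_scanEnts_spec (idx : Int) (es : List String) : ∀ d : PySem.Dict String Int,
    ((pvScanEnts d idx es).2 = true ↔ ∃ e ∈ es, ∃ p, d.get? e = some p ∧ p ≠ idx) ∧
    ((pvScanEnts d idx es).2 = false → ∀ x,
      (pvScanEnts d idx es).1.get? x =
        if (d.get? x).isSome then d.get? x else if x ∈ es then some idx else none) := by
  induction es with
  | nil =>
    intro d
    refine ⟨by simp [pvScanEnts], ?_⟩
    intro _ x; simp only [pvScanEnts]
    cases d.get? x <;> simp
  | cons e es ih =>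
    intro d
    cases hd : d.get? e with
    | some p =>
      have hstep : pvStep d idx e = (d, p != idx) := by simp [pvStep, hd]
      by_cases hp : p = idx
      · have hsc : pvScanEnts d idx (e :: es) = pvScanEnts d idx es := by
          simp [pvScanEnts, hstep, hp]
        rw [hsc]
        constructor
        · rw [(ih d).1]
          constructor
          · rintro ⟨x, hx, q, hq, hqi⟩
            exact ⟨x, List.mem_cons_of_mem _ hx, q, hq, hqi⟩
          · rintro ⟨x, hx, q, hq, hqi⟩
            rcases List.mem_cons.1 hx with rfl | hx'
            · rw [hd] at hq; injection hq with h; subst hp; exact absurd h.symm hqi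
            · exact ⟨x, hx', q, hq, hqi⟩
        · intro hb x
          rw [(ih d).2 hb x]
          cases hg : d.get? x with
          | some q => simp
          | none =>
            have hxe : x ≠ e := fun h => by rw [h, hd] at hg; cases hg
            simp [List.mem_cons, hxe]
      · have hsc : pvScanEnts d idx (e :: es) = (d, true) := by
          simp [pvScanEnts, hstep, hp]
        rw [hsc]
        refine ⟨?_, by simp⟩
        simp only [true_iff]
        exact ⟨e, List.mem_cons_self, p, hd, hp⟩
    | none =>
      have hsc : pvScanEnts d idx (e :: es) = pvScanEnts (d.insert e idx) idx es := by
        simp [pvScanEnts, pvStep, hd]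
      rw [hsc]
      have ihd := ih (d.insert e idx)
      constructor
      · rw [ihd.1]
        constructor
        · rintro ⟨x, hx, q, hq, hqi⟩
          refine ⟨x, List.mem_cons_of_mem _ hx, q, ?_, hqi⟩
          rw [PySem.Dict.get?_insert] at hq
          split at hq
          · injection hq with h; exact absurd h.symm hqi
          · exact hq
        · rintro ⟨x, hx, q, hq, hqi⟩
          rcases List.mem_cons.1 hx with rfl | hx'
          · rw [hd] at hq; cases hq
          · refine ⟨x, hx', q, ?_, hqi⟩
            rw [PySem.Dict.get?_insert]
            split
            · next heq => rw [heq, hd] at hq; cases hq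
            · exact hq
      · intro hb x
        rw [ihd.2 hb x, PySem.Dict.get?_insert]
        by_cases hxe : x = e
        · subst hxe; simp [hd]
        · simp only [if_neg hxe]
          cases hg : d.get? x <;> simp [List.mem_cons, hxe]

-- B's group scan, from a dict whose recorded indices are all below the current one,
-- reports true iff an entity of the group is already in the dict or the group overlaps
theorem pv_scanGroup_iff (gs : List (List (String × String × String))) :
    ∀ (d : PySem.Dict String Int) (idx : Int),
    (∀ e p, d.get? e = some p → p < idx) →
    (pvScanGroup d idx gs = true ↔
      (∃ path ∈ gs, ∃ e ∈ pvEntsL path, (d.get? e).isSome) ∨ pvGP gs) := by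
  induction gs with
  | nil => intro d idx _; simp [pvScanGroup, pvGP]
  | cons g rest ih =>
    intro d idx hd
    have spec := pv_scanEnts_spec idx (pvEntsL g) d
    simp only [pvScanGroup, pv_scanPath_eq idx g d]
    by_cases hb : (pvScanEnts d idx (pvEntsL g)).2
    · simp only [hb, if_true, true_iff]
      rcases spec.1.mp hb with ⟨e, he, p, hp, _⟩
      exact Or.inl ⟨g, List.mem_cons_self, e, he, by rw [hp]; rfl⟩
    · have hbf : (pvScanEnts d idx (pvEntsL g)).2 = false := by simpa using hb
      simp only [hbf, Bool.false_eq_true, if_false]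
      have hd1 := spec.2 hbf
      have hnone : ∀ e ∈ pvEntsL g, d.get? e = none := by
        intro e he
        cases hg : d.get? e with
        | none => rfl
        | some p =>
          have hlt := hd e p hg
          exact absurd (spec.1.mpr ⟨e, he, p, hg, by omega⟩) (by simp [hbf])
      have hd1' : ∀ e q, (pvScanEnts d idx (pvEntsL g)).1.get? e = some q → q < idx + 1 := by
        intro e q h
        rw [hd1 e] at h
        split at h
        · have := hd e q h; omega
        · split at h
          · injection h with h'; omega
          · cases h
      rw [ih _ _ hd1']
      have hsome : ∀ e, (((pvScanEnts d idx (pvEntsL g)).1.get? e).isSome = true) ↔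
          ((d.get? e).isSome = true ∨ e ∈ pvEntsL g) := by
        intro e
        rw [hd1 e]
        cases hg : d.get? e with
        | some q => simp
        | none => by_cases hm : e ∈ pvEntsL g <;> simp [hm]
      constructor
      · rintro (⟨p, hp, e, he, hs⟩ | h)
        · rcases (hsome e).mp hs with hs' | hg
          · exact Or.inl ⟨p, List.mem_cons_of_mem _ hp, e, he, hs'⟩
          · exact Or.inr (Or.inl ⟨e, hg, p, hp, he⟩)
        · exact Or.inr (Or.inr h)
      · rintro (⟨p, hp, e, he, hs⟩ | ⟨e, heg, q, hq, heq⟩ | h)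
        · rcases List.mem_cons.1 hp with rfl | hp'
          · rw [hnone e he] at hs; cases hs
          · exact Or.inl ⟨p, hp', e, he, (hsome e).mpr (Or.inl hs)⟩
        · exact Or.inl ⟨q, hq, e, heq, (hsome e).mpr (Or.inr heg)⟩
        · exact Or.inr h

-- A's pair test reports true iff the group overlaps
theorem pv_pairs_iff (gs : List (List (String × String × String))) :
    pvPairs (gs.map pvEnts) = true ↔ pvGP gs := by
  induction gs with
  | nil => simp [pvPairs, pvGP]
  | cons g rest ih =>
    simp only [List.map_cons, pvPairs, pvGP, Bool.or_eq_true, ih, List.any_map, List.any_eq_true,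
      Function.comp, Bool.not_eq_eq_eq_not, Bool.not_true, List.isEmpty_eq_false_iff_exists_mem,
      PySem.Set.mem_inter, pv_mem_ents]
    constructor
    · rintro (⟨q, hq, e, heg, heq⟩ | h)
      · exact Or.inl ⟨e, heg, q, hq, heq⟩
      · exact Or.inr h
    · rintro (⟨e, heg, q, hq, heq⟩ | h)
      · exact Or.inl ⟨q, hq, e, heg, heq⟩
      · exact Or.inr h

theorem pv_group_eq (g : List (List (String × String × String))) :
    pvPairs (g.map pvEnts) = pvScanGroup PySem.Dict.empty 0 g := by
  have hB := pv_scanGroup_iff g PySem.Dict.empty 0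
    (by intro e p h; rw [PySem.Dict.get?_empty] at h; cases h)
  have hB' : pvScanGroup PySem.Dict.empty 0 g = true ↔ pvGP g := by
    rw [hB]
    constructor
    · rintro (⟨p, _, e, _, hs⟩ | h)
      · rw [PySem.Dict.get?_empty] at hs; cases hs
      · exact h
    · exact Or.inr
  cases ha : pvPairs (g.map pvEnts) with
  | true => exact (hB'.mpr ((pv_pairs_iff g).mp ha)).symm
  | false =>
    cases hb : pvScanGroup PySem.Dict.empty 0 g with
    | true => rw [← ha, (pv_pairs_iff g).mpr (hB'.mp hb)]
    | false => rfl

-- ===== VERDICT (by name: the statement is the Claim_ definition above) =====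
theorem has_cross_depth_entity_overlap_spec : Claim_equal_has_cross_depth_entity_overlap := by
  intro rcs _
  unfold Spec_has_cross_depth_entity_overlap has_cross_depth_entity_overlap
    has_cross_depth_entity_overlap_alt
  simp only [pv_group_eq]
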